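-- pv_equiv track=rewrite | github.com/RBKunnela/ALMA-memory | benchmarks/task_dependency/dag_generator.py | _deep_narrow
-- ===== SOURCE A (Python) =====
-- from typing import Dict, List, Set, Tuple
--
-- def _deep_narrow(n: int) -> Tuple[List[str], List[Tuple[str, str]]]:
--     """Deep narrow tree: depth = n, width = 2 at each level.
--
--     Each level has two tasks. The left task of each level depends on
--     the left task of the previous level. The right task depends on
--     the right task of the previous level. This creates two parallel
--     chains of depth n.
--
--     Total tasks: 2 * n.
--     """
--     n = max(n, 2)
--     task_ids: List[str] = []
--     edges: List[Tuple[str, str]] = []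
--
--     for level in range(n):
--         left = f"t{level * 2}"
--         right = f"t{level * 2 + 1}"
--         task_ids.extend([left, right])
--
--         if level > 0:
--             prev_left = f"t{(level - 1) * 2}"
--             prev_right = f"t{(level - 1) * 2 + 1}"
--             edges.append((prev_left, left))
--             edges.append((prev_right, right))
--
--     return task_ids, edges
-- ===== SOURCE B (Python) =====
-- from typing import List, Tuple
--
-- def _chain(start: int, depth: int) -> Tuple[List[str], List[Tuple[str, str]]]:
--     """One chain built back-to-front: nodes t{start}, t{start+2}, ... (depth
--     nodes), edges between consecutive nodes."""
--     end = start + 2 * (depth - 1)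
--     nodes: List[str] = []
--     edges: List[Tuple[str, str]] = []
--     v = end
--     while v > start:
--         nodes.append(f"t{v}")
--         edges.append((f"t{v - 2}", f"t{v}"))
--         v -= 2
--     nodes.append(f"t{start}")
--     return nodes[::-1], edges[::-1]
--
-- def _interleave(xs, ys):
--     out = []
--     for x, y in zip(xs, ys):
--         out.append(x)
--         out.append(y)
--     return out
--
-- def _deep_narrow(n: int) -> Tuple[List[str], List[Tuple[str, str]]]:
--     n = max(n, 2)
--     left_nodes, left_edges = _chain(0, n)
--     right_nodes, right_edges = _chain(1, n)
--     return _interleave(left_nodes, right_nodes), _interleave(left_edges, right_edges)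
-- ===== Notes on version B (the rewrite author's own statement) =====
-- stated objective: alternative
-- what changed: A runs one loop over levels emitting both chains' ids and edges interleaved while recomputing the previous level's names; B builds each of the two parallel chains independently back-to-front (a descending loop collecting nodes and consecutive edges, then reversed) and round-robin-merges the two node lists and the two edge lists.
import Mathlib
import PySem

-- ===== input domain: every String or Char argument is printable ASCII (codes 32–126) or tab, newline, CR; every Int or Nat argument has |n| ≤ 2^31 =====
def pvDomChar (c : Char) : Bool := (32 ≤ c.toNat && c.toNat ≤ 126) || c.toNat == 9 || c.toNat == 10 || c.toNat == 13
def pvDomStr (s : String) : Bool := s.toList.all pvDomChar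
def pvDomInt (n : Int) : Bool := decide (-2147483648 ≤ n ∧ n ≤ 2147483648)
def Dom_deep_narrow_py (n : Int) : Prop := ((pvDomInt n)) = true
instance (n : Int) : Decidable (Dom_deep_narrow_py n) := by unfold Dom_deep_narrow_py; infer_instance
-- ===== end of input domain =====

-- B builds the two parallel chains independently (each back-to-front, then reversed) and
-- round-robin merges the node and edge lists, instead of A's single level loop (objective: alternative).


-- ===== PORT A =====
-- the loop body of A's 'for level in range(n)'
def deep_narrow_step (st : List String × List (String × String)) (level : Int) :
    List String × List (String × String) :=
  let left := "t" ++ PySem.Int.toStr (level * 2)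
  let right := "t" ++ PySem.Int.toStr (level * 2 + 1)
  let task_ids := st.1 ++ [left, right]
  let edges :=
    if 0 < level then
      let prev_left := "t" ++ PySem.Int.toStr ((level - 1) * 2)
      let prev_right := "t" ++ PySem.Int.toStr ((level - 1) * 2 + 1)
      st.2 ++ [(prev_left, left), (prev_right, right)]
    else st.2
  (task_ids, edges)

def deep_narrow_py (n : Int) : List String × (List (String × String)) :=
  let n := max n 2
  (PySem.List.pyRange 0 n 1).foldl deep_narrow_step ([], [])

-- ===== PORT B =====
-- B's `_chain`, built back-to-front: the while loop runs with v = start+2j for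
-- j = depth-1, depth-2, …, 1 (j : Nat is the remaining iteration count), then the
-- lone t{start} is appended and both lists are reversed (Python's [::-1]).
def deep_narrow_chain_down (start : Int) : Nat → List String × List (String × String)
  | 0 => ([], [])
  | j + 1 =>
    let v := start + 2 * ((j : Int) + 1)
    let rest := deep_narrow_chain_down start j
    (("t" ++ PySem.Int.toStr v) :: rest.1,
     ("t" ++ PySem.Int.toStr (v - 2), "t" ++ PySem.Int.toStr v) :: rest.2)

def deep_narrow_chain (start : Int) (depth : Nat) : List String × List (String × String) :=
  let lp := deep_narrow_chain_down start (depth - 1)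
  ((lp.1 ++ ["t" ++ PySem.Int.toStr start]).reverse, lp.2.reverse)

-- B's `_interleave` (zip-driven round-robin merge)
def deep_narrow_interleave {α : Type} : List α → List α → List α
  | x :: xs, y :: ys => x :: y :: deep_narrow_interleave xs ys
  | _, _ => []

def deep_narrow_py_alt (n : Int) : List String × (List (String × String)) :=
  let m := max n 2
  let leftc := deep_narrow_chain 0 m.toNat
  let rightc := deep_narrow_chain 1 m.toNat
  (deep_narrow_interleave leftc.1 rightc.1, deep_narrow_interleave leftc.2 rightc.2)

-- ===== PRECONDITION & SPEC =====
def Spec_deep_narrow_py (n : Int) (out : List String × (List (String × String))) : Prop := out = deep_narrow_py_alt n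
instance (n : Int) (out : List String × (List (String × String))) : Decidable (Spec_deep_narrow_py n out) := by unfold Spec_deep_narrow_py; infer_instance

-- ===== CLAIM (what is proved, stated in full; the proofs are below) =====
def Claim_equal_deep_narrow_py : Prop := ∀ (n : Int), Dom_deep_narrow_py n → Spec_deep_narrow_py n (deep_narrow_py n)

-- ===== LEMMAS AND PROOFS =====
def pvF (i : Nat) : String := "t" ++ PySem.Int.toStr (i : Int)

def pvIDs (k : Nat) : List String := (List.range (2 * k)).map pvF

def pvEDG (k : Nat) : List (String × String) :=
  (List.range (2 * k - 2)).map (fun i => (pvF i, pvF (i + 2)))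

lemma pvA_loop (k : Nat) :
    (PySem.List.pyRange 0 (k : Int) 1).foldl deep_narrow_step ([], []) = (pvIDs k, pvEDG k) := by
  induction k with
  | zero => simp [PySem.List.pyRange_one_eq_nil, pvIDs, pvEDG]
  | succ k ih =>
    have hsplit : PySem.List.pyRange 0 ((k + 1 : Nat) : Int) 1 =
        PySem.List.pyRange 0 (k : Int) 1 ++ [(k : Int)] := by
      have := PySem.List.pyRange_one_succ_right (a := 0) (b := (k : Int)) (by positivity)
      push_cast at this ⊢
      exact this
    rw [hsplit, List.foldl_append, ih]
    simp only [List.foldl]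
    unfold deep_narrow_step
    have hids : pvIDs (k + 1) = pvIDs k ++
        ["t" ++ PySem.Int.toStr ((k : Int) * 2), "t" ++ PySem.Int.toStr ((k : Int) * 2 + 1)] := by
      have h2 : 2 * (k + 1) = (2 * k + 1) + 1 := by ring
      simp only [pvIDs, h2, List.range_succ, List.map_append]
      simp [pvF]
      constructor <;> (congr 1) <;> omega
    by_cases hk : 0 < (k : Int)
    · have hk' : 1 ≤ k := by exact_mod_cast hk
      have hedg : pvEDG (k + 1) = pvEDG k ++
          [("t" ++ PySem.Int.toStr (((k : Int) - 1) * 2), "t" ++ PySem.Int.toStr ((k : Int) * 2)),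
           ("t" ++ PySem.Int.toStr (((k : Int) - 1) * 2 + 1), "t" ++ PySem.Int.toStr ((k : Int) * 2 + 1))] := by
        have h2 : 2 * (k + 1) - 2 = ((2 * k - 2) + 1) + 1 := by omega
        simp only [pvEDG, h2, List.range_succ, List.map_append]
        simp [pvF]
        refine ⟨⟨?_, ?_⟩, ?_, ?_⟩ <;> (congr 1) <;>
          · have : ((2 * k - 2 : Nat) : Int) = 2 * (k : Int) - 2 := by omega
            omega
      simp [hids, hedg]
      omega
    · have hk0 : k = 0 := by omega
      subst hk0
      simp [pvEDG, pvIDs]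
      decide

-- closed form of B's chain: nodes t_s, t_{s+2}, ...; edges between consecutive nodes
lemma pv_chain_down_rev (s : Nat) (j : Nat) :
    deep_narrow_chain_down (s : Int) j =
      (((List.range j).map (fun i => pvF (s + 2 * (i + 1)))).reverse,
       ((List.range j).map (fun i => (pvF (s + 2 * i), pvF (s + 2 * i + 2)))).reverse) := by
  induction j with
  | zero => simp [deep_narrow_chain_down]
  | succ j ih =>
    rw [deep_narrow_chain_down, ih]
    simp only [List.range_succ, List.map_append, List.map_singleton, List.reverse_append,
      List.reverse_singleton, List.singleton_append]
    refine Prod.ext ?_ ?_ <;> simp only <;> refine congrArg₂ _ ?_ rfl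
    · exact congrArg _ (congrArg _ (by push_cast; ring))
    · exact congrArg₂ _ (congrArg _ (congrArg _ (by push_cast; ring)))
        (congrArg _ (congrArg _ (by push_cast; ring)))

lemma pv_chain_eq (d : Nat) (s : Nat) (hd : 1 ≤ d) :
    deep_narrow_chain (s : Int) d =
      ((List.range d).map (fun i => pvF (s + 2 * i)),
       (List.range (d - 1)).map (fun i => (pvF (s + 2 * i), pvF (s + 2 * i + 2)))) := by
  unfold deep_narrow_chain
  rw [pv_chain_down_rev]
  refine Prod.ext ?_ ?_
  · simp only [List.reverse_append, List.reverse_reverse, List.reverse_singleton,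
      List.singleton_append]
    obtain ⟨d', rfl⟩ : ∃ d', d = d' + 1 := ⟨d - 1, by omega⟩
    rw [show List.range (d' + 1) = 0 :: (List.range d').map Nat.succ from List.range_succ_eq_map,
      List.map_cons, List.map_map, Nat.add_sub_cancel]
    refine congrArg₂ _ ?_ ?_
    · simp [pvF]
    · apply List.map_congr_left; intro i _
      simp only [Function.comp_apply]
  · simp [List.reverse_reverse]

lemma pv_interleave_append {α : Type} (xs ys : List α) (a b : α)
    (h : xs.length = ys.length) :
    deep_narrow_interleave (xs ++ [a]) (ys ++ [b]) = deep_narrow_interleave xs ys ++ [a, b] := by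
  induction xs generalizing ys with
  | nil =>
    cases ys with
    | nil => simp [deep_narrow_interleave]
    | cons y ys => simp at h
  | cons x xs ih =>
    cases ys with
    | nil => simp at h
    | cons y ys =>
      simp only [List.cons_append, deep_narrow_interleave, List.length_cons] at *
      rw [ih ys (by omega)]

lemma pv_interleave_maps (k : Nat) (f g : Nat → String)
    (hf : ∀ i, f i = pvF (2 * i)) (hg : ∀ i, g i = pvF (2 * i + 1)) :
    deep_narrow_interleave ((List.range k).map f) ((List.range k).map g) = pvIDs k := by
  induction k with
  | zero => simp [deep_narrow_interleave, pvIDs]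
  | succ k ih =>
    rw [List.range_succ, List.map_append, List.map_append, List.map_singleton,
        List.map_singleton, pv_interleave_append _ _ _ _ (by simp), ih]
    have h2 : 2 * (k + 1) = (2 * k + 1) + 1 := by ring
    simp [pvIDs, h2, List.range_succ, hf, hg]

lemma pv_interleave_edges (j : Nat) (f g : Nat → String × String)
    (hf : ∀ i, f i = (pvF (2 * i), pvF (2 * i + 2)))
    (hg : ∀ i, g i = (pvF (2 * i + 1), pvF (2 * i + 3))) :
    deep_narrow_interleave ((List.range j).map f) ((List.range j).map g) =
      (List.range (2 * j)).map (fun i => (pvF i, pvF (i + 2))) := by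
  induction j with
  | zero => simp [deep_narrow_interleave]
  | succ j ih =>
    rw [List.range_succ, List.map_append, List.map_append, List.map_singleton,
        List.map_singleton, pv_interleave_append _ _ _ _ (by simp), ih]
    have h2 : 2 * (j + 1) = (2 * j + 1) + 1 := by ring
    simp only [h2, List.range_succ, List.map_append, List.map_singleton, List.append_assoc]
    congr 2
    · rw [hf]
    · rw [hg]
      have : 2 * j + 1 + 2 = 2 * j + 3 := by ring
      simp [this]

theorem deep_narrow_py_spec : Claim_equal_deep_narrow_py := by
  intro n _
  unfold Spec_deep_narrow_py deep_narrow_py deep_narrow_py_alt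
  obtain ⟨k, hk, hk2⟩ : ∃ k : Nat, max n 2 = (k : Int) ∧ 2 ≤ k := by
    refine ⟨(max n 2).toNat, ?_, ?_⟩
    · rw [Int.toNat_of_nonneg (by omega)]
    · have : (2 : Int) ≤ max n 2 := le_max_right _ _
      omega
  rw [hk, pvA_loop]
  simp only [Int.toNat_natCast]
  have hL := pv_chain_eq k 0 (by omega)
  have hR := pv_chain_eq k 1 (by omega)
  push_cast at hL hR
  rw [hL, hR]
  refine Prod.ext ?_ ?_
  · exact (pv_interleave_maps k _ _
      (fun i => congrArg pvF (by omega)) (fun i => congrArg pvF (by omega))).symm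
  · rw [pv_interleave_edges (k - 1) _ _
      (fun i => Prod.ext (congrArg pvF (by omega)) (congrArg pvF (by omega)))
      (fun i => Prod.ext (congrArg pvF (by omega)) (congrArg pvF (by omega)))]
    have h2 : 2 * (k - 1) = 2 * k - 2 := by omega
    rw [h2]
    rfl
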